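-- pv_equiv track=rewrite | github.com/ainoobmenpg/easy-cpx | backend/app/services/sitrep_generator.py | _generate_logistics
-- ===== SOURCE A (Python) =====
-- def _generate_logistics(units: list[dict]) -> dict:
--     """Generate logistics summary"""
--     ammo_full = sum(1 for u in units if u.get("ammo") == "full")
--     ammo_depleted = sum(1 for u in units if u.get("ammo") == "depleted")
--     ammo_exhausted = sum(1 for u in units if u.get("ammo") == "exhausted")
--
--     fuel_full = sum(1 for u in units if u.get("fuel") == "full")
--     fuel_depleted = sum(1 for u in units if u.get("fuel") == "depleted")
--     fuel_exhausted = sum(1 for u in units if u.get("fuel") == "exhausted")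
--
--     return {
--         "ammo": {
--             "full": ammo_full,
--             "depleted": ammo_depleted,
--             "exhausted": ammo_exhausted
--         },
--         "fuel": {
--             "full": fuel_full,
--             "depleted": fuel_depleted,
--             "exhausted": fuel_exhausted
--         }
--     }
-- ===== SOURCE B (Python) =====
-- def _generate_logistics(units: list[dict]) -> dict:
--     """Generate logistics summary (single pass over two frequency tables)."""
--     ammo_counts = {}
--     fuel_counts = {}
--     for u in units:
--         a = u.get("ammo")
--         ammo_counts[a] = ammo_counts.get(a, 0) + 1
--         f = u.get("fuel")
--         fuel_counts[f] = fuel_counts.get(f, 0) + 1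
--     statuses = ("full", "depleted", "exhausted")
--     return {
--         "ammo": {s: ammo_counts.get(s, 0) for s in statuses},
--         "fuel": {s: fuel_counts.get(s, 0) for s in statuses},
--     }
-- ===== Notes on version B (the rewrite author's own statement) =====
-- stated objective: idiomatic
-- what changed: Replaces six separate scans of the unit list (one per resource/status pair) with a single pass that builds two frequency tables and then reads the three status counts out of each table.
import Mathlib
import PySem

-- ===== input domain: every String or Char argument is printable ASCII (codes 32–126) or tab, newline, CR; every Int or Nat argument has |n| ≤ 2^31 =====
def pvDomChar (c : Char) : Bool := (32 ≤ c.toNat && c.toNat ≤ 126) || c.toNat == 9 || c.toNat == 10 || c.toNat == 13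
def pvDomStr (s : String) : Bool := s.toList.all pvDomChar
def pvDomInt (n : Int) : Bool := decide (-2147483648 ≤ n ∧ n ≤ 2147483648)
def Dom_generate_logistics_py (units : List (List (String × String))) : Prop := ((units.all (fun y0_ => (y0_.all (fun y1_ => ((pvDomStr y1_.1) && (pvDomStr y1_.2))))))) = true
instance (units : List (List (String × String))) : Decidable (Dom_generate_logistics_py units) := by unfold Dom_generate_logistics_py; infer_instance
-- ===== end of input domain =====

-- B replaces A's six separate scans of the unit list with a single pass building
-- two frequency tables, read out afterwards (objective: idiomatic single-pass counting).


-- shared helper: Python's u.get(k) on an insertion-ordered dict (first match)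
def pvGet (u : List (String × String)) (k : String) : Option String :=
  (PySem.Dict.mk u).get? k

-- ===== PORT A =====
-- sum(1 for u in units if u.get(key) == val)
def pvCountScan (units : List (List (String × String))) (key val : String) : Int :=
  units.foldl (fun acc u => if pvGet u key == some val then acc + 1 else acc) 0

def generate_logistics_py (units : List (List (String × String))) : List (String × List (String × Int)) :=
  let ammo_full := pvCountScan units "ammo" "full"
  let ammo_depleted := pvCountScan units "ammo" "depleted"
  let ammo_exhausted := pvCountScan units "ammo" "exhausted"
  let fuel_full := pvCountScan units "fuel" "full"
  let fuel_depleted := pvCountScan units "fuel" "depleted"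
  let fuel_exhausted := pvCountScan units "fuel" "exhausted"
  [("ammo", [("full", ammo_full), ("depleted", ammo_depleted), ("exhausted", ammo_exhausted)]),
   ("fuel", [("full", fuel_full), ("depleted", fuel_depleted), ("exhausted", fuel_exhausted)])]

-- ===== PORT B =====
-- one loop over units updating the two frequency tables (Source B's for-loop body)
def pvTables (units : List (List (String × String))) :
    PySem.Dict (Option String) Int × PySem.Dict (Option String) Int :=
  units.foldl
    (fun s u =>
      let a := pvGet u "ammo"
      let s1 := s.1.insert a (s.1.getD a 0 + 1)
      let f := pvGet u "fuel"
      let s2 := s.2.insert f (s.2.getD f 0 + 1)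
      (s1, s2))
    (PySem.Dict.empty, PySem.Dict.empty)

def generate_logistics_py_alt (units : List (List (String × String))) : List (String × List (String × Int)) :=
  let t := pvTables units
  let statuses := ["full", "depleted", "exhausted"]
  [("ammo", statuses.map (fun s => (s, t.1.getD (some s) 0))),
   ("fuel", statuses.map (fun s => (s, t.2.getD (some s) 0)))]

-- ===== PRECONDITION & SPEC =====
def Spec_generate_logistics_py (units : List (List (String × String))) (out : List (String × List (String × Int))) : Prop := out = generate_logistics_py_alt units
instance (units : List (List (String × String))) (out : List (String × List (String × Int))) : Decidable (Spec_generate_logistics_py units out) := by unfold Spec_generate_logistics_py; infer_instance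

-- ===== CLAIM (what is proved, stated in full; the proofs are below) =====
def Claim_equal_generate_logistics_py : Prop := ∀ (units : List (List (String × String))), Dom_generate_logistics_py units → Spec_generate_logistics_py units (generate_logistics_py units)

-- ===== LEMMAS AND PROOFS =====

-- the pair-fold is the two single-dict counting folds side by side
lemma pvTables_eq (units : List (List (String × String)))
    (da df : PySem.Dict (Option String) Int) :
    units.foldl
      (fun s u =>
        let a := pvGet u "ammo"
        let s1 := s.1.insert a (s.1.getD a 0 + 1)
        let f := pvGet u "fuel"
        let s2 := s.2.insert f (s.2.getD f 0 + 1)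
        (s1, s2))
      (da, df)
    = ((units.map (fun u => pvGet u "ammo")).foldl (fun d x => d.insert x (d.getD x 0 + 1)) da,
       (units.map (fun u => pvGet u "fuel")).foldl (fun d x => d.insert x (d.getD x 0 + 1)) df) := by
  induction units generalizing da df with
  | nil => rfl
  | cons u rest ih => simpa using ih _ _

-- A's scan counts occurrences of `some val` among the looked-up values
lemma pvCountScan_eq_count (units : List (List (String × String))) (key val : String) (acc : Int) :
    units.foldl (fun acc u => if pvGet u key == some val then acc + 1 else acc) acc
    = acc + ((units.map (fun u => pvGet u key)).count (some val) : Int) := by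
  induction units generalizing acc with
  | nil => simp
  | cons u rest ih =>
    simp only [List.foldl_cons, List.map_cons, List.count_cons, ih]
    by_cases h : pvGet u key == some val <;> simp [h] <;> omega

lemma pvCountScan_eq_table (units : List (List (String × String))) (key val : String) :
    pvCountScan units key val
    = ((units.map (fun u => pvGet u key)).foldl (fun d x => d.insert x (d.getD x 0 + 1))
        (PySem.Dict.empty : PySem.Dict (Option String) Int)).getD (some val) 0 := by
  rw [pvCountScan, pvCountScan_eq_count, PySem.Dict.getD_foldl_insert_add_one]
  simp [PySem.Dict.getD_empty]

-- ===== VERDICT (by name: the statement is the Claim_ definition above) =====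
theorem generate_logistics_py_spec : Claim_equal_generate_logistics_py := by
  intro units _
  show generate_logistics_py units = generate_logistics_py_alt units
  simp only [generate_logistics_py, generate_logistics_py_alt, pvTables, pvTables_eq,
    pvCountScan_eq_table, List.map]
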